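-- pv_equiv track=rewrite | github.com/HSZemi/mccommands | 1.8/makeIronFarm_18.py | sub_build_command_blocks
-- ===== SOURCE A (Python) =====
-- def sub_build_command_blocks(commands):
-- 	if(len(commands) > 0):
-- 		string = 'Block:"command_block",Time:1,TileEntityData:{Command:'
-- 		string += commands.pop()
-- 		string += '},Riding:{id:FallingSand,'
-- 		string += sub_build_command_blocks(commands)
-- 		string += '}'
-- 		return string
-- 	else:
-- 		return 'Block:"air",Time:1'
-- ===== SOURCE B (Python) =====
-- def sub_build_command_blocks(commands):
-- 	result = 'Block:"air",Time:1'
-- 	for c in commands: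
-- 		result = ('Block:"command_block",Time:1,TileEntityData:{Command:' + c
-- 			+ '},Riding:{id:FallingSand,' + result + '}')
-- 	commands.clear()
-- 	return result
-- ===== Notes on version B (the rewrite author's own statement) =====
-- stated objective: simpler
-- what changed: Replaced the tail-popping recursion with a single forward fold over the list that wraps an accumulator (first command innermost), plus commands.clear() to keep A's list-emptying side effect.
import Mathlib
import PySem

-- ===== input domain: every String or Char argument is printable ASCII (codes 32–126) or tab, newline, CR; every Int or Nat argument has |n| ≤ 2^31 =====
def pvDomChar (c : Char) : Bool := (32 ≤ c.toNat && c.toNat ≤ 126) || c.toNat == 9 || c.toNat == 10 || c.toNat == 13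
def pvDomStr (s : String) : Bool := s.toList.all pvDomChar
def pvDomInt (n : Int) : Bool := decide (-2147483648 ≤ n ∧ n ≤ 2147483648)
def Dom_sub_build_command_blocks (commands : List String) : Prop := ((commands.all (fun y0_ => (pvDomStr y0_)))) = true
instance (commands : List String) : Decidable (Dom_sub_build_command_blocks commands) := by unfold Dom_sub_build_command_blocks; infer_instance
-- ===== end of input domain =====

-- ===== PORT A =====
-- B replaces A's tail-popping recursion with a forward fold over the list (same result;
-- both A and B empty the Python list in place — the equivalence proved is about the return value, B performs the same mutation).
-- Literal port of A: pop the last element, recurse on the rest.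
def sub_build_command_blocks (commands : List String) : String :=
  if h : commands.length > 0 then
    "Block:\"command_block\",Time:1,TileEntityData:{Command:"
      ++ commands.getLast (by intro hn; simp [hn] at h)
      ++ "},Riding:{id:FallingSand,"
      ++ sub_build_command_blocks commands.dropLast
      ++ "}"
  else
    "Block:\"air\",Time:1"
termination_by commands.length
decreasing_by simp [List.length_dropLast]; omega

-- ===== PORT B =====
-- Port of B: forward fold, accumulator starts at the air block, each command wraps it.
def sub_build_command_blocks_alt (commands : List String) : String :=
  commands.foldl
    (fun result c =>
      "Block:\"command_block\",Time:1,TileEntityData:{Command:" ++ c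
        ++ "},Riding:{id:FallingSand," ++ result ++ "}")
    "Block:\"air\",Time:1"

-- ===== PRECONDITION & SPEC =====
def Spec_sub_build_command_blocks (commands : List String) (out : String) : Prop := out = sub_build_command_blocks_alt commands
instance (commands : List String) (out : String) : Decidable (Spec_sub_build_command_blocks commands out) := by unfold Spec_sub_build_command_blocks; infer_instance

-- ===== CLAIM (what is proved, stated in full; the proofs are below) =====
def Claim_equal_sub_build_command_blocks : Prop := ∀ (commands : List String), Dom_sub_build_command_blocks commands → Spec_sub_build_command_blocks commands (sub_build_command_blocks commands)

-- ===== LEMMAS AND PROOFS =====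

-- ===== VERDICT (by name: the statement is the Claim_ definition above) =====
theorem A_concat (xs : List String) (c : String) :
    sub_build_command_blocks (xs ++ [c])
      = "Block:\"command_block\",Time:1,TileEntityData:{Command:" ++ c
        ++ "},Riding:{id:FallingSand," ++ sub_build_command_blocks xs ++ "}" := by
  rw [sub_build_command_blocks]
  simp

theorem A_eq_alt (commands : List String) :
    sub_build_command_blocks commands = sub_build_command_blocks_alt commands := by
  induction commands using List.reverseRecOn with
  | nil => rw [sub_build_command_blocks]; rfl
  | append_singleton xs c ih =>
      rw [A_concat, ih]
      simp [sub_build_command_blocks_alt]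

theorem sub_build_command_blocks_spec : Claim_equal_sub_build_command_blocks := by
  intro commands _
  exact A_eq_alt commands
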